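-- pv_equiv track=rewrite | github.com/LoialOtter/KicadFPGA | netlist_to_vhdl.py | align_on_pipe
-- ===== SOURCE A (Python) =====
-- def align_on_pipe(doc : str) -> str:
--     n_splits = 0
--     segs = []
--     cur_seg = []
--     for line in doc.splitlines():
--         found = line.split('|')
--         if len(found) != n_splits:
--             n_splits = len(found)
--             if cur_seg:
--                 segs.append(cur_seg)
--                 cur_seg = []
--         cur_seg.append(line)
--     if cur_seg:
--         segs.append(cur_seg)
--
--     # now align the segs
--     out = []
--     for seg in segs:
--         max = [0] * len(seg[0].split('|'))
--         for line in seg: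
--             parts = line.split('|')
--             for i in range(len(parts)):
--                 if len(parts[i]) > max[i]:
--                     max[i] = len(parts[i])
--
--         for line in seg:
--             parts = line.split('|')
--             new_line = ''
--             for i in range(len(max)):
--                 new_line += f'{parts[i]:<{max[i]}}'
--             #new_line += parts[-1]
--             out.append(new_line)
--     return '\n'.join(out)
-- ===== SOURCE B (Python) =====
-- def align_on_pipe(doc: str) -> str:
--     def render(run):
--         # build all output lines of the run in parallel, column by column
--         rows = [''] * len(run)
--         for col in zip(*(line.split('|') for line in run)):
--             w = max(map(len, col))
--             rows = [r + c.ljust(w) for r, c in zip(rows, col)]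
--         return rows
--
--     def go(lines):
--         if not lines:
--             return []
--         k = len(lines[0].split('|'))
--         i = 1
--         while i < len(lines) and len(lines[i].split('|')) == k:
--             i += 1
--         return render(lines[:i]) + go(lines[i:])
--
--     return '\n'.join(go(doc.splitlines()))
-- ===== Notes on version B (the rewrite author's own statement) =====
-- stated objective: alternative
-- what changed: B never materialises a per-segment widths vector or renders lines one at a time: it decomposes the lines recursively into runs and renders each run column-major, transposing the split cells with zip(*...) and folding over the columns, computing each column's max and padding all of the run's partially-built output lines simultaneously at each column step, instead of A's two staged row-major passes (in-place max array, then per-line left-to-right concatenation).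
import Mathlib
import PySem

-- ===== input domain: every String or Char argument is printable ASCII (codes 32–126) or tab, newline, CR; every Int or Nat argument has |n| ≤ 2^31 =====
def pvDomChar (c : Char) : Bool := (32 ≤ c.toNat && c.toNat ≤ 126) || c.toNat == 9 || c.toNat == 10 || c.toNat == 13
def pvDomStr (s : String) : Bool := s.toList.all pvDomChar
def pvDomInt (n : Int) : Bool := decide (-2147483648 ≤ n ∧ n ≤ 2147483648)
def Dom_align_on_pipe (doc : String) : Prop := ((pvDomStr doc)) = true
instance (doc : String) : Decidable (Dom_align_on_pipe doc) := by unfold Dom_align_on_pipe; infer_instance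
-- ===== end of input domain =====

-- B decomposes the lines recursively into runs and renders each run COLUMN-MAJOR (transpose the split
-- cells, fold over the columns padding all of the run's partially-built output lines at once), with no
-- widths vector, instead of A's two staged row-major passes; same cost, alternative structure.

-- shared primitives: line.split('|') (separator nonempty, so split? always returns some) and
-- f'{s:<{w}}' / s.ljust(w) (pad with spaces on the right to width w; w here is never negative)
def pipeSplit (s : String) : List String := (PySem.Str.split? s "|").getD []
def pyLjust (s : String) (w : Int) : List Char :=
  s.toList ++ List.replicate (w - PySem.Str.len s).toNat ' '

-- ===== PORT A =====
def alignA_step (st : Int × List (List String) × List String) (line : String) :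
    Int × List (List String) × List String :=
  let found := pipeSplit line
  if (found.length : Int) ≠ st.1 then
    if st.2.2 ≠ [] then ((found.length : Int), st.2.1 ++ [st.2.2], [line])
    else ((found.length : Int), st.2.1, st.2.2 ++ [line])
  else (st.1, st.2.1, st.2.2 ++ [line])

-- max = [0]*len(seg[0].split('|')); per-line, per-index in-place max update
-- (seg is never empty where this is called; headD "" stands for Python's seg[0])
def alignA_widths (seg : List String) : List Int :=
  seg.foldl (fun maxs line =>
      let parts := pipeSplit line
      (List.range parts.length).foldl (fun m i =>
        if PySem.Str.len (parts.getD i "") > m.getD i 0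
        then m.set i (PySem.Str.len (parts.getD i "")) else m) maxs)
    (List.replicate (pipeSplit (seg.headD "")).length (0 : Int))

-- new_line = ''; for i in range(len(max)): new_line += f'{parts[i]:<{max[i]}}'
def alignA_render (maxs : List Int) (line : String) : String :=
  let parts := pipeSplit line
  String.ofList ((List.range maxs.length).foldl
    (fun acc i => acc ++ pyLjust (parts.getD i "") (maxs.getD i 0)) [])

def align_on_pipe (doc : String) : String :=
  let st := (PySem.Str.splitlines doc).foldl alignA_step (0, [], [])
  let segs := if st.2.2 ≠ [] then st.2.1 ++ [st.2.2] else st.2.1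
  let out := segs.foldl (fun out seg =>
    seg.foldl (fun o line => o ++ [alignA_render (alignA_widths seg) line]) out) []
  PySem.Str.join "\n" out

-- ===== PORT B =====
-- zip(*xss): the columns of xss, stopping at the shortest row (Python's zip; ported by hand, exact)
def zipCols : List (List String) → List (List String)
  | [] => []
  | x :: xs =>
    if h : ((x :: xs).any (·.isEmpty)) then []
    else (((x :: xs)).map (fun r => r.headD "")) :: zipCols ((x :: xs).map (fun r => r.tail))
termination_by xss => (xss.headD []).length
decreasing_by
  simp only [List.map_cons, List.headD_cons]
  simp only [List.any_cons, Bool.or_eq_true, List.isEmpty_iff] at h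
  push_neg at h
  cases x with
  | nil => exact absurd rfl h.1
  | cons a t => simp

-- render(run): rows = ['']*len(run); per column, w = max(map(len, col)); pad every row at once
-- (strings built by concatenation are carried as List Char, turned into String at the end; exact)
def renderB (run : List String) : List String :=
  let rowsF := (zipCols (run.map pipeSplit)).foldl (fun rows col =>
      let w := (PySem.List.max? (col.map PySem.Str.len) (fun x => x)).getD 0
      (rows.zip col).map (fun rc => rc.1 ++ pyLjust rc.2 w))
    (List.replicate run.length ([] : List Char))
  rowsF.map String.ofList

-- go(lines): peel off the maximal run sharing the head's field count
-- (the index scan 'while i < len(lines) and len(lines[i].split('|')) == k' as takeWhile/dropWhile)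
def goB : List String → List String
  | [] => []
  | l :: rest =>
    let k := (pipeSplit l).length
    let run := l :: rest.takeWhile (fun x => (pipeSplit x).length == k)
    renderB run ++ goB (rest.dropWhile (fun x => (pipeSplit x).length == k))
termination_by lines => lines.length
decreasing_by
  exact Nat.lt_succ_of_le (List.length_dropWhile_le _ _)

def align_on_pipe_alt (doc : String) : String :=
  PySem.Str.join "\n" (goB (PySem.Str.splitlines doc))

-- ===== PRECONDITION & SPEC =====
def Spec_align_on_pipe (doc : String) (out : String) : Prop := out = align_on_pipe_alt doc
instance (doc : String) (out : String) : Decidable (Spec_align_on_pipe doc out) := by unfold Spec_align_on_pipe; infer_instance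

-- ===== CLAIM (what is proved, stated in full; the proofs are below) =====
def Claim_equal_align_on_pipe : Prop := ∀ (doc : String), Dom_align_on_pipe doc → Spec_align_on_pipe doc (align_on_pipe doc)

-- ===== LEMMAS AND PROOFS =====

-- the number of '|'-parts of a line
def cnt (s : String) : Nat := (pipeSplit s).length

-- the maximal runs of lines with equal part count, in order
def segments : List String → List (List String)
  | [] => []
  | l :: rest =>
    (l :: rest.takeWhile (fun x => cnt x == cnt l)) ::
      segments (rest.dropWhile (fun x => cnt x == cnt l))
termination_by lines => lines.length
decreasing_by
  exact Nat.lt_succ_of_le (List.length_dropWhile_le _ _)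

-- A's segmentation fold, written as a recursion on the remaining lines
def glom : Int → List String → List String → List (List String)
  | _, cur, [] => if cur ≠ [] then [cur] else []
  | n, cur, l :: ls =>
    if (cnt l : Int) ≠ n then
      (if cur ≠ [] then [cur] else []) ++ glom (cnt l) [l] ls
    else glom n (cur ++ [l]) ls

def flushSegs (st : Int × List (List String) × List String) : List (List String) :=
  if st.2.2 ≠ [] then st.2.1 ++ [st.2.2] else st.2.1

-- the column maxima of a run, as a vector (proof-only restatement of both programs' widths)
def segWidths (k : Nat) (rows : List (List String)) : List Int :=
  (List.range k).map (fun c =>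
    (PySem.List.max? (rows.map (fun r => PySem.Str.len (r.getD c ""))) (fun x => x)).getD 0)

theorem foldA (lines : List String) : ∀ (n : Int) (segs : List (List String)) (cur : List String),
    flushSegs (lines.foldl alignA_step (n, segs, cur)) = segs ++ glom n cur lines := by
  induction lines with
  | nil =>
    intro n segs cur
    by_cases h : cur = [] <;> simp [flushSegs, glom, h]
  | cons l ls ih =>
    intro n segs cur
    simp only [List.foldl_cons]
    by_cases hne : ((pipeSplit l).length : Int) ≠ n
    · by_cases hcur : cur = []
      · simp [alignA_step, hne, hcur, ih, glom, cnt]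
      · simp [alignA_step, hne, hcur, ih, glom, cnt]
    · simp [alignA_step, hne, ih, glom, cnt, not_not.mp hne]

theorem glom_ne (lines : List String) : ∀ (m : Nat) (cur : List String), cur ≠ [] →
    glom (m : Int) cur lines =
      (cur ++ lines.takeWhile (fun x => cnt x == m)) ::
        segments (lines.dropWhile (fun x => cnt x == m)) := by
  induction lines with
  | nil => intro m cur hcur; simp [glom, hcur, segments]
  | cons l ls ih =>
    intro m cur hcur
    by_cases h : cnt l = m
    · have : ¬ ((cnt l : Int) ≠ (m : Int)) := by simp [h]
      simp only [glom, this, if_neg]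
      rw [ih m (cur ++ [l]) (by simp)]
      simp [List.takeWhile_cons, List.dropWhile_cons, h]
    · have hne : (cnt l : Int) ≠ (m : Int) := by
        exact_mod_cast fun hh => h (Nat.cast_injective hh)
      simp only [glom, hne, if_pos, hcur, if_neg]
      rw [ih (cnt l) [l] (by simp)]
      have hb : (cnt l == m) = false := by simp [h]
      simp [List.dropWhile_cons, hb, segments, hcur]
      exact fun hh => absurd hh h

theorem segsA (lines : List String) :
    flushSegs (lines.foldl alignA_step (0, [], [])) = segments lines := by
  rw [foldA]
  cases lines with
  | nil => simp [glom, segments]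
  | cons l ls =>
    have h0 : glom 0 [] (l :: ls) = glom (cnt l) [l] ls := by
      by_cases h : (cnt l : Int) ≠ 0 <;> simp [glom, h] <;>
        simp_all
    rw [h0, glom_ne ls (cnt l) [l] (by simp)]
    simp [segments]

-- every segment is nonempty with all lines sharing the head's part count
theorem segments_shape (lines : List String) :
    ∀ seg ∈ segments lines, ∃ h t, seg = h :: t ∧ ∀ x ∈ t, cnt x = cnt h := by
  induction lines using segments.induct with
  | case1 => simp [segments]
  | case2 l rest ih =>
    intro seg hseg
    rw [segments] at hseg
    rcases List.mem_cons.mp hseg with h | h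
    · subst h
      exact ⟨l, _, rfl, fun x hx => by
        have := List.mem_takeWhile_imp hx; simpa using this⟩
    · exact ih seg h

-- ---- pointwise-max characterisation of A's inner index loop ----

theorem innerA_prefix (parts : List String) (m : List Int) (hlen : parts.length = m.length) :
    ∀ k, k ≤ parts.length →
      (List.range k).foldl (fun m i =>
        if PySem.Str.len (parts.getD i "") > m.getD i 0
        then m.set i (PySem.Str.len (parts.getD i "")) else m) m
      = List.zipWith max (m.take k) ((parts.map (fun p => PySem.Str.len p)).take k) ++ m.drop k := by
  intro k
  induction k with
  | zero => simp
  | succ k ih =>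
    intro hk
    have hk' : k ≤ parts.length := Nat.le_of_succ_le hk
    have hkm : k < m.length := by omega
    have hkp : k < parts.length := by omega
    rw [List.range_succ, List.foldl_append, ih hk']
    have hlenA : (List.zipWith max (m.take k) ((parts.map (fun p => PySem.Str.len p)).take k)).length = k := by
      simp; omega
    have hdrop : m.drop k = m[k] :: m.drop (k + 1) := by
      rw [List.drop_eq_getElem_cons hkm]
    have hgetD : (List.zipWith max (m.take k) ((parts.map (fun p => PySem.Str.len p)).take k) ++ m.drop k).getD k 0 = m[k] := by
      rw [List.getD_eq_getElem?_getD, List.getElem?_append_right (by omega), hlenA, Nat.sub_self, hdrop]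
      rfl
    have hpart : parts.getD k "" = parts[k] := by
      rw [List.getD_eq_getElem?_getD, List.getElem?_eq_getElem hkp]; rfl
    have hset : ∀ v : Int,
        (List.zipWith max (m.take k) ((parts.map (fun p => PySem.Str.len p)).take k) ++ m.drop k).set k v
        = List.zipWith max (m.take k) ((parts.map (fun p => PySem.Str.len p)).take k) ++ v :: m.drop (k+1) := by
      intro v
      rw [List.set_append, if_neg (by rw [hlenA]; omega), hlenA, Nat.sub_self, hdrop]
      rfl
    have htake : List.zipWith max (m.take (k+1)) ((parts.map (fun p => PySem.Str.len p)).take (k+1))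
        = List.zipWith max (m.take k) ((parts.map (fun p => PySem.Str.len p)).take k)
          ++ [max m[k] (PySem.Str.len parts[k])] := by
      rw [List.take_add_one, List.take_add_one]
      rw [List.getElem?_eq_getElem hkm, List.getElem?_eq_getElem (by simpa using hkp)]
      rw [List.zipWith_append (by simp; omega)]
      simp [List.getElem_map]
    simp only [List.foldl_cons, List.foldl_nil]
    simp only [hgetD, hpart]
    by_cases hgt : PySem.Str.len parts[k] > m[k]
    · have hmx : max m[k] (PySem.Str.len parts[k]) = PySem.Str.len parts[k] := by omega
      rw [if_pos hgt, hset, htake, hmx, List.append_assoc]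
      rfl
    · have hmx : max m[k] (PySem.Str.len parts[k]) = m[k] := by omega
      rw [if_neg hgt, htake, hmx, hdrop, List.append_assoc]
      rfl

theorem innerA (parts : List String) (m : List Int) (hlen : parts.length = m.length) :
    (List.range parts.length).foldl (fun m i =>
        if PySem.Str.len (parts.getD i "") > m.getD i 0
        then m.set i (PySem.Str.len (parts.getD i "")) else m) m
      = List.zipWith max m (parts.map (fun p => PySem.Str.len p)) := by
  rw [innerA_prefix parts m hlen parts.length (le_refl _)]
  rw [List.take_of_length_le (by omega), List.take_of_length_le (by simp),
    List.drop_of_length_le (by omega)]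
  simp

-- ---- the zipWith-max fold, read off column by column ----

theorem zfold (ls : List (List Int)) : ∀ (m : List Int), (∀ r ∈ ls, r.length = m.length) →
    ((ls.foldl (fun m r => List.zipWith max m r) m).length = m.length ∧
     ∀ c, c < m.length →
      (ls.foldl (fun m r => List.zipWith max m r) m).getD c 0
        = (ls.map (fun r => r.getD c 0)).foldl max (m.getD c 0)) := by
  induction ls with
  | nil => intro m _; exact ⟨rfl, by simp⟩
  | cons r rs ih =>
    intro m hlen
    have hr : r.length = m.length := hlen r (by simp)
    have hz : (List.zipWith max m r).length = m.length := by simp [hr]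
    have step := ih (List.zipWith max m r) (by
      intro x hx; rw [hz]; exact hlen x (by simp [hx]))
    refine ⟨by simp only [List.foldl_cons]; rw [step.1, hz], ?_⟩
    intro c hc
    simp only [List.foldl_cons, List.map_cons]
    rw [step.2 c (by omega)]
    congr 1
    rw [List.getD_eq_getElem?_getD, List.getElem?_eq_getElem (by rw [hz]; omega)]
    rw [List.getElem_zipWith]
    rw [List.getD_eq_getElem?_getD, List.getElem?_eq_getElem hc,
      List.getD_eq_getElem?_getD, List.getElem?_eq_getElem (by omega)]
    rfl

-- Str.len is nonnegative
theorem len_nonneg (s : String) : 0 ≤ PySem.Str.len s := by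
  rw [PySem.Str.len_eq]; exact_mod_cast Nat.zero_le _

-- ---- replacing A's inner index loop by zipWith max along the whole segment fold ----

theorem widthsA_fold (lines : List String) : ∀ (m : List Int), (∀ x ∈ lines, cnt x = m.length) →
    lines.foldl (fun maxs line =>
      let parts := pipeSplit line
      (List.range parts.length).foldl (fun m i =>
        if PySem.Str.len (parts.getD i "") > m.getD i 0
        then m.set i (PySem.Str.len (parts.getD i "")) else m) maxs) m
    = lines.foldl (fun m line => List.zipWith max m ((pipeSplit line).map (fun p => PySem.Str.len p))) m := by
  induction lines with
  | nil => intro m _; rfl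
  | cons l ls ih =>
    intro m hall
    have hl : cnt l = m.length := hall l (by simp)
    simp only [List.foldl_cons]
    rw [innerA (pipeSplit l) m hl]
    exact ih _ (by
      intro x hx
      rw [List.length_zipWith, List.length_map]
      have : (pipeSplit l).length = m.length := hl
      rw [this, min_self]
      exact hall x (by simp [hx]))

-- ---- the widths of a segment agree with the column maxima ----

theorem widths_eq (h : String) (t : List String) (hall : ∀ x ∈ t, cnt x = cnt h) :
    alignA_widths (h :: t) = segWidths (cnt h) ((h :: t).map pipeSplit) := by
  have hallc : ∀ x ∈ h :: t, cnt x = cnt h := by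
    intro x hx
    rcases List.mem_cons.mp hx with hx | hx
    · rw [hx]
    · exact hall x hx
  have hA : alignA_widths (h :: t)
      = ((h :: t).map (fun line => (pipeSplit line).map (fun p => PySem.Str.len p))).foldl
          (fun m r => List.zipWith max m r) (List.replicate (cnt h) 0) := by
    unfold alignA_widths
    rw [List.headD_cons]
    have hch : (pipeSplit h).length = cnt h := rfl
    rw [hch]
    rw [widthsA_fold (h :: t) (List.replicate (cnt h) 0) (by
      intro x hx; rw [List.length_replicate]; exact hallc x hx)]
    rw [List.foldl_map]
  have hlens : ∀ r ∈ (h :: t).map (fun line => (pipeSplit line).map (fun p => PySem.Str.len p)),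
      r.length = (List.replicate (cnt h) (0 : Int)).length := by
    intro r hr
    rcases List.mem_map.mp hr with ⟨line, hline, rfl⟩
    rw [List.length_map, List.length_replicate]
    exact hallc line hline
  have hz := zfold ((h :: t).map (fun line => (pipeSplit line).map (fun p => PySem.Str.len p)))
      (List.replicate (cnt h) 0) hlens
  apply List.ext_getElem
  · rw [hA, hz.1]
    simp [segWidths]
  · intro c hc1 hc2
    have hcL : c < cnt h := by
      have := hc1; rw [hA, hz.1, List.length_replicate] at this; exact this
    -- A's entry
    have hAc : (alignA_widths (h :: t))[c]'hc1
        = (((h :: t).map (fun line => (pipeSplit line).map (fun p => PySem.Str.len p))).map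
            (fun r => r.getD c 0)).foldl max 0 := by
      have hgd : (alignA_widths (h :: t)).getD c 0
          = (((h :: t).map (fun line => (pipeSplit line).map (fun p => PySem.Str.len p))).map
              (fun r => r.getD c 0)).foldl max ((List.replicate (cnt h) (0:Int)).getD c 0) := by
        rw [hA]; exact hz.2 c (by rw [List.length_replicate]; exact hcL)
      rw [List.getD_eq_getElem?_getD, List.getElem?_eq_getElem hc1] at hgd
      simp only [Option.getD_some] at hgd
      rw [hgd, List.getD_replicate]
      exact hcL
    -- both entries are the same column maximum
    have hcol : ∀ line ∈ h :: t,
        ((pipeSplit line).map (fun p => PySem.Str.len p)).getD c 0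
          = PySem.Str.len ((pipeSplit line).getD c "") := by
      intro line hline
      have hcl : c < (pipeSplit line).length := by
        show c < cnt line
        rw [hallc line hline]; exact hcL
      rw [List.getD_eq_getElem?_getD, List.getElem?_eq_getElem (by simpa using hcl),
        List.getD_eq_getElem?_getD, List.getElem?_eq_getElem hcl]
      simp
    have hBc : (segWidths (cnt h) ((h :: t).map pipeSplit))[c]'hc2
        = (PySem.List.max? (((h :: t).map pipeSplit).map
            (fun r => PySem.Str.len (r.getD c ""))) (fun x => x)).getD 0 := by
      simp only [segWidths]
      rw [List.getElem_map, List.getElem_range]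
    rw [hAc, hBc]
    -- flatten the double maps into maps over (h :: t)
    rw [List.map_map, List.map_map]
    have hfun : ∀ line ∈ h :: t,
        ((fun r => PySem.Str.len (r.getD c "")) ∘ pipeSplit) line
          = ((fun r => r.getD c 0) ∘ fun line => (pipeSplit line).map (fun p => PySem.Str.len p)) line := by
      intro line hline
      simp only [Function.comp_apply]
      rw [hcol line hline]
    rw [List.map_congr_left hfun]
    simp only [List.map_cons, Function.comp_apply]
    rw [PySem.List.max?_id_cons]
    simp only [Option.getD_some, List.foldl_cons]
    congr 1
    have h0 : (0 : Int) ≤ ((pipeSplit h).map (fun p => PySem.Str.len p)).getD c 0 := by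
      rw [hcol h (by simp)]
      exact len_nonneg _
    omega

-- ---- B's column fold: rows built in parallel = per-row flatten over the columns ----

theorem colfold (cols : List (List String)) : ∀ (acc : List (List Char)),
    (∀ col ∈ cols, col.length = acc.length) →
    ((cols.foldl (fun rows col =>
        let w := (PySem.List.max? (col.map PySem.Str.len) (fun x => x)).getD 0
        (rows.zip col).map (fun rc => rc.1 ++ pyLjust rc.2 w)) acc).length = acc.length ∧
     ∀ r (hr : r < acc.length),
      (cols.foldl (fun rows col =>
        let w := (PySem.List.max? (col.map PySem.Str.len) (fun x => x)).getD 0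
        (rows.zip col).map (fun rc => rc.1 ++ pyLjust rc.2 w)) acc).getD r []
        = acc[r]'hr ++ (cols.map (fun col =>
            pyLjust (col.getD r "") ((PySem.List.max? (col.map PySem.Str.len) (fun x => x)).getD 0))).flatten) := by
  induction cols with
  | nil => intro acc _; exact ⟨rfl, by
      intro r hr
      simp [List.getD_eq_getElem?_getD, List.getElem?_eq_getElem hr]⟩
  | cons col cols ih =>
    intro acc hlen
    have hc : col.length = acc.length := hlen col (by simp)
    have hz : ((acc.zip col).map (fun rc =>
        rc.1 ++ pyLjust rc.2 ((PySem.List.max? (col.map PySem.Str.len) (fun x => x)).getD 0))).length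
        = acc.length := by
      simp [List.length_zip, hc]
    have step := ih ((acc.zip col).map (fun rc =>
        rc.1 ++ pyLjust rc.2 ((PySem.List.max? (col.map PySem.Str.len) (fun x => x)).getD 0)))
      (by intro x hx; rw [hz]; exact hlen x (by simp [hx]))
    refine ⟨by simp only [List.foldl_cons]; rw [step.1, hz], ?_⟩
    intro r hr
    simp only [List.foldl_cons, List.map_cons, List.flatten_cons]
    rw [step.2 r (by omega)]
    have hrz : r < (acc.zip col).length := by rw [List.length_zip, hc]; simp [hr]
    rw [List.getElem_map, List.getElem_zip]
    have hcol : col[r]'(by omega) = col.getD r "" := by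
      rw [List.getD_eq_getElem?_getD, List.getElem?_eq_getElem (by omega)]; rfl
    rw [hcol, List.append_assoc]

-- ---- zipCols of a rectangular nonempty matrix is its list of columns ----

theorem getD_tail {α : Type} (row : List α) (d : α) (c : Nat) :
    row.tail.getD c d = row.getD (c + 1) d := by
  cases row <;> simp

theorem zipCols_rect (k : Nat) : ∀ (rows : List (List String)), rows ≠ [] →
    (∀ r ∈ rows, r.length = k) →
    zipCols rows = (List.range k).map (fun c => rows.map (fun row => row.getD c "")) := by
  induction k with
  | zero =>
    intro rows hne hall
    cases rows with
    | nil => exact absurd rfl hne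
    | cons x xs =>
      have hx : x = [] := List.eq_nil_of_length_eq_zero (hall x (by simp))
      rw [zipCols, dif_pos (by simp [hx])]
      simp
  | succ k ih =>
    intro rows hne hall
    cases rows with
    | nil => exact absurd rfl hne
    | cons x xs =>
      have hno : ((x :: xs).any (·.isEmpty)) = false := by
        simp only [List.any_eq_false]
        intro r hr
        have := hall r hr
        simp [List.isEmpty_iff]
        exact fun h => by simp [h] at this
      rw [zipCols, dif_neg (by simp [hno])]
      rw [ih ((x :: xs).map (fun r => r.tail)) (by simp) (by
        intro r hr
        rcases List.mem_map.mp hr with ⟨row, hrow, rfl⟩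
        have := hall row hrow
        simp [List.length_tail, this])]
      rw [List.range_succ_eq_map]
      conv_rhs => rw [List.map_cons, List.map_map]
      congr 1
      · apply List.map_congr_left
        intro row hrow
        have hl := hall row hrow
        cases row with
        | nil => simp at hl
        | cons a t => simp
      · apply List.map_congr_left
        intro c _
        simp only [Function.comp_apply, List.map_map]
        apply List.map_congr_left
        intro row _
        exact getD_tail row "" c

-- ---- per-segment rendered output agrees ----

theorem seg_out_eq (seg : List String)
    (hshape : ∃ h t, seg = h :: t ∧ ∀ x ∈ t, cnt x = cnt h) :
    seg.map (alignA_render (alignA_widths seg)) = renderB seg := by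
  rcases hshape with ⟨h, t, rfl, hall⟩
  have hallc : ∀ x ∈ h :: t, cnt x = cnt h := by
    intro x hx
    rcases List.mem_cons.mp hx with hx | hx
    · rw [hx]
    · exact hall x hx
  set k := cnt h with hk
  set rows := (h :: t).map pipeSplit with hrows
  have hrowlen : ∀ r ∈ rows, r.length = k := by
    intro r hr
    rcases List.mem_map.mp hr with ⟨line, hline, rfl⟩
    exact hallc line hline
  have hzc : zipCols rows = (List.range k).map (fun c => rows.map (fun row => row.getD c "")) :=
    zipCols_rect k rows (by simp [hrows]) hrowlen
  -- the fold's columns all have the run's length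
  have hcollen : ∀ col ∈ zipCols rows,
      col.length = (List.replicate (h :: t).length ([] : List Char)).length := by
    intro col hcol
    rw [hzc] at hcol
    rcases List.mem_map.mp hcol with ⟨c, _, rfl⟩
    simp [hrows]
  have hcf := colfold (zipCols rows) (List.replicate (h :: t).length ([] : List Char)) hcollen
  -- widths: each column's max is the corresponding entry of alignA_widths
  have hwid := widths_eq h t hall
  have hWlen : (alignA_widths (h :: t)).length = k := by
    rw [hwid]
    simp only [segWidths, List.length_map, List.length_range]
    exact hk.symm
  -- compare elementwise
  unfold renderB
  rw [← hrows]
  apply List.ext_getElem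
  · rw [List.length_map, List.length_map, hcf.1, List.length_replicate]
  · intro r hr1 hr2
    have hrn : r < (h :: t).length := by
      rw [List.length_map] at hr1; exact hr1
    have hracc : r < (List.replicate (h :: t).length ([] : List Char)).length := by
      simpa using hrn
    -- B's row r
    have hBrow : ((zipCols rows).foldl (fun rows col =>
          let w := (PySem.List.max? (col.map PySem.Str.len) (fun x => x)).getD 0
          (rows.zip col).map (fun rc => rc.1 ++ pyLjust rc.2 w))
          (List.replicate (h :: t).length ([] : List Char))).getD r []
        = ((zipCols rows).map (fun col =>
            pyLjust (col.getD r "") ((PySem.List.max? (col.map PySem.Str.len) (fun x => x)).getD 0))).flatten := by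
      rw [hcf.2 r hracc]
      simp
    have hgetB : ((zipCols rows).foldl (fun rows col =>
          let w := (PySem.List.max? (col.map PySem.Str.len) (fun x => x)).getD 0
          (rows.zip col).map (fun rc => rc.1 ++ pyLjust rc.2 w))
          (List.replicate (h :: t).length ([] : List Char)))[r]'(by rw [hcf.1]; exact hracc)
        = ((zipCols rows).foldl (fun rows col =>
          let w := (PySem.List.max? (col.map PySem.Str.len) (fun x => x)).getD 0
          (rows.zip col).map (fun rc => rc.1 ++ pyLjust rc.2 w))
          (List.replicate (h :: t).length ([] : List Char))).getD r [] := by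
      rw [List.getD_eq_getElem?_getD, List.getElem?_eq_getElem (by rw [hcf.1]; exact hracc)]
      rfl
    rw [List.getElem_map, List.getElem_map, hgetB, hBrow]
    -- A's row r
    set line := (h :: t)[r]'hrn with hline
    have hlinemem : line ∈ h :: t := by rw [hline]; exact List.getElem_mem hrn
    have hclr : cnt line = k := hallc line hlinemem
    have hA : alignA_render (alignA_widths (h :: t)) line
        = String.ofList ((List.range (alignA_widths (h :: t)).length).foldl
            (fun acc i => acc ++ pyLjust ((pipeSplit line).getD i "")
              ((alignA_widths (h :: t)).getD i 0)) []) := rfl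
    rw [hA]
    congr 1
    rw [PySem.List.foldl_append_eq_flatMap
      (fun i => pyLjust ((pipeSplit line).getD i "") ((alignA_widths (h :: t)).getD i 0))]
    rw [List.flatMap_def, List.nil_append, hWlen]
    -- both sides are flattens over range k; compare the mapped functions
    rw [hzc, List.map_map]
    congr 1
    apply List.map_congr_left
    intro c hc
    have hck : c < k := List.mem_range.mp hc
    simp only [Function.comp_apply]
    -- cells agree
    have hcell : (rows.map (fun row => row.getD c "")).getD r ""
        = (pipeSplit line).getD c "" := by
      have hrlen : r < rows.length := by
        rw [hrows, List.length_map]; exact hrn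
      rw [List.getD_eq_getElem?_getD,
        List.getElem?_eq_getElem (by rw [List.length_map]; exact hrlen),
        List.getElem_map]
      simp only [Option.getD_some]
      congr 1
      simp only [hrows, List.getElem_map, hline]
    -- widths agree
    have hwc : ((PySem.List.max? ((rows.map (fun row => row.getD c "")).map PySem.Str.len)
          (fun x => x)).getD 0)
        = (alignA_widths (h :: t)).getD c 0 := by
      rw [hwid]
      have hcr : c < (segWidths k rows).length := by simp [segWidths, hck]
      rw [List.getD_eq_getElem?_getD, List.getElem?_eq_getElem hcr]
      simp only [segWidths, List.getElem_map, List.getElem_range, Option.getD_some]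
      rw [List.map_map]
      rfl
    rw [hcell, hwc]

-- B's recursion, written as a flatMap over the segments
theorem goB_eq (lines : List String) :
    goB lines = (segments lines).flatMap renderB := by
  induction lines using goB.induct with
  | case1 => rw [goB, segments]; rfl
  | case2 l rest a ih =>
    rw [goB, segments, List.flatMap_cons]
    unfold cnt at ih ⊢
    rw [← ih]

-- A's output, written as the same flatMap over the segments
theorem outA (lines : List String) :
    (flushSegs (lines.foldl alignA_step (0, [], []))).foldl (fun out seg =>
        seg.foldl (fun o line => o ++ [alignA_render (alignA_widths seg) line]) out) []
      = (segments lines).flatMap (fun seg => seg.map (alignA_render (alignA_widths seg))) := by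
  rw [segsA]
  rw [PySem.List.foldl_congr_mem (segments lines) _
    (fun out seg => out ++ seg.map (alignA_render (alignA_widths seg))) []
    (by
      intro acc seg _
      exact PySem.List.foldl_append_singleton_eq_map (alignA_render (alignA_widths seg)) seg acc)]
  rw [PySem.List.foldl_append_eq_flatMap]
  rfl

-- ===== VERDICT (by name: the statement is the Claim_ definition above) =====
theorem align_on_pipe_spec : Claim_equal_align_on_pipe := by
  intro doc _
  unfold Spec_align_on_pipe align_on_pipe align_on_pipe_alt
  show PySem.Str.join "\n"
      ((flushSegs ((PySem.Str.splitlines doc).foldl alignA_step (0, [], []))).foldl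
        (fun out seg => seg.foldl (fun o line => o ++ [alignA_render (alignA_widths seg) line]) out) [])
    = PySem.Str.join "\n" (goB (PySem.Str.splitlines doc))
  congr 1
  rw [outA, goB_eq]
  exact List.flatMap_congr (fun seg hseg => seg_out_eq seg (segments_shape _ seg hseg))
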